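-- pv_equiv track=rewrite | github.com/mohammadfaiizan/ProjectI | DSA/Problem/Dynamic Programming/01_Fibonacci_Linear_DP/1025_Divisor_Game.py | divisor_game_tabulation
-- ===== SOURCE A (Python) =====
-- def divisor_game_tabulation(n):
--     """
--     DYNAMIC PROGRAMMING - BOTTOM UP (TABULATION):
--     =============================================
--     Build solution from bottom up using DP array.
--     dp[i] = True if current player can win starting with number i
--
--     Time Complexity: O(n^2) - nested loops for all numbers and divisors
--     Space Complexity: O(n) - DP array
--     """
--     if n == 1:
--         return False
--
--     # dp[i] = True if current player wins starting with number i
--     dp = [False] * (n + 1)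
--     dp[1] = False  # Base case: starting with 1, current player loses
--
--     # Fill DP table from 2 to n
--     for i in range(2, n + 1):
--         # Try all possible moves (all divisors x where 0 < x < i)
--         for x in range(1, i):
--             if i % x == 0:
--                 # If opponent loses from state (i - x), current player wins
--                 if not dp[i - x]:
--                     dp[i] = True
--                     break  # Found a winning move, no need to check more
--
--     return dp[n]
-- ===== SOURCE B (Python) =====
-- def divisor_game_tabulation(n):
--     """Closed form: the first player wins the divisor game iff n is even."""
--     return n % 2 == 0
-- ===== Notes on version B (the rewrite author's own statement) =====
-- stated objective: faster
-- what changed: Replaced the O(n^2) bottom-up DP table with the closed form n % 2 == 0 (proved equal by strong induction on the DP invariant).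
import Mathlib
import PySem

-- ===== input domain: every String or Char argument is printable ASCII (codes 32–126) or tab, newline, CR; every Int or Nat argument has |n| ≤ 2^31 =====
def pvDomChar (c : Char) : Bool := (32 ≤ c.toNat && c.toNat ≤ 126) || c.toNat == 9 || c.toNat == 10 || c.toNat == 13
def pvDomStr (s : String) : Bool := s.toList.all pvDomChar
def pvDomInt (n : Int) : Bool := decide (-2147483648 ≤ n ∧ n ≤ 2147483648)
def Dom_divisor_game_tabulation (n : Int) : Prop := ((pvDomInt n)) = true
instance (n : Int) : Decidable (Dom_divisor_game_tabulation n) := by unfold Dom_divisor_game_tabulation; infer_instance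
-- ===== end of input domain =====

-- B replaces A's O(n^2) DP table with the closed form n % 2 == 0 (equality proved below).

-- ===== PORT A =====
def divisor_game_tabulation (n : Int) : Bool :=
  if n == 1 then false
  else
    let dp : List Bool := List.replicate (n + 1).toNat false
    let dp := PySem.List.pySetD dp 1 false
    let dp := (PySem.List.pyRange 2 (n + 1) 1).foldl
      (fun dp i =>
        -- inner 'for x in range(1, i)' with break: dp[i] becomes True iff some x succeeds
        if (PySem.List.pyRange 1 i 1).any
             (fun x => PySem.Int.mod i x == 0 && !(PySem.List.pyGetD dp (i - x) false))
        then PySem.List.pySetD dp i true else dp) dp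
    PySem.List.pyGetD dp n false

-- ===== PORT B =====
def divisor_game_tabulation_alt (n : Int) : Bool :=
  PySem.Int.mod n 2 == 0

-- ===== PRECONDITION & SPEC =====
-- A raises IndexError (dp[1] on a list of length ≤ 1) for every n ≤ 0.
def Pre_divisor_game_tabulation (n : Int) : Prop := 1 ≤ n
instance (n : Int) : Decidable (Pre_divisor_game_tabulation n) := by unfold Pre_divisor_game_tabulation; infer_instance
def pvWitness_divisor_game_tabulation : Int := 4

def Spec_divisor_game_tabulation (n : Int) (out : Bool) : Prop := out = divisor_game_tabulation_alt n
instance (n : Int) (out : Bool) : Decidable (Spec_divisor_game_tabulation n out) := by unfold Spec_divisor_game_tabulation; infer_instance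

-- ===== CLAIM (what is proved, stated in full; the proofs are below) =====
def Claim_equal_divisor_game_tabulation : Prop := ∀ (n : Int), Dom_divisor_game_tabulation n → Pre_divisor_game_tabulation n → Spec_divisor_game_tabulation n (divisor_game_tabulation n)

-- ===== LEMMAS AND PROOFS =====

-- the loop body of A's port, named for the proofs
def pvStep (dp : List Bool) (i : Int) : List Bool :=
  if (PySem.List.pyRange 1 i 1).any
       (fun x => PySem.Int.mod i x == 0 && !(PySem.List.pyGetD dp (i - x) false))
  then PySem.List.pySetD dp i true else dp

lemma getD_replicate_false (k : Nat) (j : Int) :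
    PySem.List.pyGetD (List.replicate k false) j false = false := by
  simp only [PySem.List.pyGetD, PySem.List.pyGet?, PySem.List.pyIdx?]
  split_ifs <;> simp [List.getElem?_replicate] <;> split_ifs <;> simp

lemma getD_setD (xs : List Bool) (i j : Int) (v : Bool)
    (h0 : 0 ≤ i) (h0j : 0 ≤ j) (h : i < xs.length) :
    PySem.List.pyGetD (PySem.List.pySetD xs i v) j false
      = if j = i then v else PySem.List.pyGetD xs j false := by
  obtain ⟨k, rfl⟩ : ∃ k : Nat, i = (k : Int) := ⟨i.toNat, by omega⟩
  obtain ⟨l, rfl⟩ : ∃ l : Nat, j = (l : Int) := ⟨j.toNat, by omega⟩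
  rw [PySem.List.pyGetD_pySetD_natCast xs k l v false (by exact_mod_cast h)]
  simp

-- invariant of A's DP loop: after processing 2 .. 2+m-1, dp[j] = (2 <= j < 2+m and j even)
lemma dp_inv (n : Int) (hn : 2 ≤ n) (m : Nat) (hm : 2 + (m : Int) ≤ n + 1) :
    ((PySem.List.pyRange 2 (2 + (m : Int)) 1).foldl pvStep
        (PySem.List.pySetD (List.replicate (n + 1).toNat false) 1 false)).length
      = (n + 1).toNat ∧
    ∀ j : Int, 0 ≤ j →
      PySem.List.pyGetD
        ((PySem.List.pyRange 2 (2 + (m : Int)) 1).foldl pvStep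
          (PySem.List.pySetD (List.replicate (n + 1).toNat false) 1 false)) j false
      = decide (2 ≤ j ∧ j < 2 + (m : Int) ∧ PySem.Int.mod j 2 = 0) := by
  have hdp0 : PySem.List.pySetD (List.replicate (n + 1).toNat false) 1 false
      = List.replicate (n + 1).toNat false := by
    rw [PySem.List.pySetD_of_nonneg _ _ (by omega)]
    exact List.set_replicate_self
  induction m with
  | zero =>
    rw [PySem.List.pyRange_one_eq_nil (by omega)]
    rw [List.foldl_nil, hdp0]
    refine ⟨by simp, fun j _ => ?_⟩
    rw [getD_replicate_false, eq_comm, decide_eq_false_iff_not,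
      PySem.Int.mod_eq_emod_of_pos (by omega : (0:Int) < 2)]
    push_cast; omega
  | succ m ih =>
    have hm' : 2 + (m : Int) ≤ n + 1 := by push_cast at hm ⊢; omega
    obtain ⟨ihlen, ihget⟩ := ih hm'
    set dp := (PySem.List.pyRange 2 (2 + (m : Int)) 1).foldl pvStep
        (PySem.List.pySetD (List.replicate (n + 1).toNat false) 1 false) with hdp
    have hsplit : PySem.List.pyRange 2 (2 + ((m + 1 : Nat) : Int)) 1
        = PySem.List.pyRange 2 (2 + (m : Int)) 1 ++ [2 + (m : Int)] := by
      have h2 : (2 + ((m + 1 : Nat) : Int)) = (2 + (m : Int)) + 1 := by push_cast; ring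
      rw [h2, PySem.List.pyRange_one_succ_right (by omega)]
    rw [hsplit, List.foldl_append, List.foldl_cons, List.foldl_nil, ← hdp]
    set i : Int := 2 + (m : Int) with hi
    have hi2 : 2 ≤ i := by omega
    have hin : i ≤ n := by push_cast at hm; omega
    have hilen : i < (dp.length : Int) := by rw [ihlen]; omega
    have hbound : (2 + ((m + 1 : Nat) : Int)) = i + 1 := by push_cast; ring
    by_cases hpar : PySem.Int.mod i 2 = 0
    · -- i even: x = 1 is a winning move, dp[i] := true
      have hparE : i % 2 = 0 := by
        rw [PySem.Int.mod_eq_emod_of_pos (by omega : (0:Int) < 2)] at hpar; exact hpar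
      have hany : (PySem.List.pyRange 1 i 1).any
          (fun x => PySem.Int.mod i x == 0 && !(PySem.List.pyGetD dp (i - x) false)) = true := by
        rw [List.any_eq_true]
        refine ⟨1, by rw [PySem.List.mem_pyRange_one]; omega, ?_⟩
        have h2 : PySem.List.pyGetD dp (i - 1) false = false := by
          rw [ihget (i - 1) (by omega), decide_eq_false_iff_not,
            PySem.Int.mod_eq_emod_of_pos (by omega : (0:Int) < 2)]
          omega
        simp [h2]
      have hstep : pvStep dp i = PySem.List.pySetD dp i true := by
        rw [pvStep, if_pos hany]
      rw [hstep]
      refine ⟨by rw [PySem.List.length_pySetD, ihlen], fun j hj => ?_⟩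
      rw [getD_setD dp i j true (by omega) hj hilen]
      by_cases hjy : j = i
      · subst hjy
        rw [if_pos rfl]
        symm; rw [decide_eq_true_iff]
        exact ⟨by omega, by rw [hbound]; omega, hpar⟩
      · rw [if_neg hjy, ihget j hj]
        simp only [decide_eq_decide]
        rw [hbound]
        constructor
        · rintro ⟨a, b, c⟩; exact ⟨a, by omega, c⟩
        · rintro ⟨a, b, c⟩; exact ⟨a, by omega, c⟩
    · -- i odd: every divisor move leads to an even state already marked winning
      have hparO : i % 2 = 1 := by
        rw [PySem.Int.mod_eq_emod_of_pos (by omega : (0:Int) < 2)] at hpar; omega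
      have hany : (PySem.List.pyRange 1 i 1).any
          (fun x => PySem.Int.mod i x == 0 && !(PySem.List.pyGetD dp (i - x) false)) = false := by
        rw [List.any_eq_false]
        intro x hx
        rw [PySem.List.mem_pyRange_one] at hx
        by_cases hdvd : PySem.Int.mod i x = 0
        · have hxdvd : x ∣ i := (PySem.Int.mod_eq_zero_iff_dvd i x).mp hdvd
          have hxodd : x % 2 = 1 := by
            rcases Int.emod_two_eq_zero_or_one x with h | h
            · exfalso
              have h2i : (2 : Int) ∣ i := (Int.dvd_of_emod_eq_zero h).trans hxdvd
              omega
            · exact h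
          have hget : PySem.List.pyGetD dp (i - x) false = true := by
            rw [ihget (i - x) (by omega), decide_eq_true_iff]
            refine ⟨by omega, by omega, ?_⟩
            rw [PySem.Int.mod_eq_emod_of_pos (by omega : (0:Int) < 2)]
            omega
          simp [hget]
        · simp [hdvd]
      have hstep : pvStep dp i = dp := by rw [pvStep, if_neg (by simp [hany])]
      rw [hstep]
      refine ⟨ihlen, fun j hj => ?_⟩
      rw [ihget j hj]
      simp only [decide_eq_decide]
      rw [hbound]
      constructor
      · rintro ⟨a, b, c⟩; exact ⟨a, by omega, c⟩
      · rintro ⟨a, b, c⟩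
        refine ⟨a, ?_, c⟩
        rcases eq_or_ne j i with rfl | hne
        · rw [PySem.Int.mod_eq_emod_of_pos (by omega : (0:Int) < 2)] at c; omega
        · omega

-- ===== VERDICT (by name: the statement is the Claim_ definition above) =====
theorem divisor_game_tabulation_spec : Claim_equal_divisor_game_tabulation := by
  intro n _ hpre
  unfold Spec_divisor_game_tabulation divisor_game_tabulation_alt
  have hpre' : (1 : Int) ≤ n := hpre
  by_cases h1 : n = 1
  · subst h1; decide
  · have hn2 : 2 ≤ n := by omega
    have hA : divisor_game_tabulation n
        = PySem.List.pyGetD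
            ((PySem.List.pyRange 2 (n + 1) 1).foldl pvStep
              (PySem.List.pySetD (List.replicate (n + 1).toNat false) 1 false)) n false := by
      rw [divisor_game_tabulation, if_neg (by simpa using h1)]
      rfl
    rw [hA]
    obtain ⟨m, hm⟩ : ∃ m : Nat, n + 1 = 2 + (m : Int) := ⟨(n - 1).toNat, by omega⟩
    have hget := (dp_inv n hn2 m (by omega)).2 n (by omega)
    rw [← hm] at hget
    rw [hget]
    by_cases hp : PySem.Int.mod n 2 = 0
    · have hL : 2 ≤ n ∧ n < n + 1 ∧ PySem.Int.mod n 2 = 0 := ⟨by omega, by omega, hp⟩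
      rw [decide_eq_true hL, hp]
      decide
    · have hL : ¬(2 ≤ n ∧ n < n + 1 ∧ PySem.Int.mod n 2 = 0) := fun h => hp h.2.2
      rw [decide_eq_false hL]
      exact (beq_eq_false_iff_ne.mpr hp).symm
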